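-- pv_equiv track=rewrite | github.com/yohi/toolkit | get_github_coderabbit_review/coderabbit_fetcher/formatters/ai_agent_prompt_formatter.py | _extract_proposed_diff
-- ===== SOURCE A (Python) =====
-- def _extract_proposed_diff(raw_content: str) -> str:
--     """Extract proposed diff from raw content."""
--     if not raw_content:
--         return ""
--
--     # Look for diff blocks or code suggestions
--     lines = raw_content.split("\n")
--     diff_lines = []
--     in_diff = False
--
--     for line in lines:
--         if "```diff" in line or "```suggestion" in line:
--             in_diff = True
--             continue
--         elif in_diff and line.strip() == "```":
--             break
--         elif in_diff:
--             diff_lines.append(line)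
--
--     if diff_lines:
--         return "\n".join(diff_lines)
--
--     # Look for lines starting with + or -
--     diff_lines = []
--     for line in lines:
--         if line.strip().startswith(("+", "-")) and len(line.strip()) > 1:
--             diff_lines.append(line)
--
--     if diff_lines:
--         return "\n".join(diff_lines)
--
--     return ""
-- ===== SOURCE B (Python) =====
-- def _extract_proposed_diff(raw_content: str) -> str:
--     """Extract proposed diff from raw content (single pass)."""
--     fenced = []
--     plus_minus = []
--     in_diff = False
--     fence_done = False
--     for line in raw_content.split("\n"):
--         stripped = line.strip()
--         if not fence_done:
--             if "```diff" in line or "```suggestion" in line: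
--                 in_diff = True
--             elif in_diff and stripped == "```":
--                 in_diff = False
--                 fence_done = True
--             elif in_diff:
--                 fenced.append(line)
--         if stripped.startswith(("+", "-")) and len(stripped) > 1:
--             plus_minus.append(line)
--     if fenced:
--         return "\n".join(fenced)
--     if plus_minus:
--         return "\n".join(plus_minus)
--     return ""
-- ===== Notes on version B (the rewrite author's own statement) =====
-- stated objective: alternative
-- what changed: A scans the lines twice (a fence-capture loop with break, then a separate +/- filter loop only if the first found nothing); B makes one single pass carrying in_diff/fence_done state and both candidate lists at once, choosing which to join only at the end.
import Mathlib
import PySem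

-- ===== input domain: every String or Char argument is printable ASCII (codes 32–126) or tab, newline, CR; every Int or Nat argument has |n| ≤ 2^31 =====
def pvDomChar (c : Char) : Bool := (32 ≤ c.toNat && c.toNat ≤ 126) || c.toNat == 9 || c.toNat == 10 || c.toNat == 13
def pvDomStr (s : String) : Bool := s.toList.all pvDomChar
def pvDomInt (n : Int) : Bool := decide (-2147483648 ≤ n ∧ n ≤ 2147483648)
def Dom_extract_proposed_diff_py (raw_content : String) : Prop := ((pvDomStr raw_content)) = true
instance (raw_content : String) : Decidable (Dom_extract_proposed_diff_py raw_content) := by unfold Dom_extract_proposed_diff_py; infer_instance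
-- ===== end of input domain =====

-- B merges A's two separate scans (fenced loop with break, then a +/- filter loop) into one
-- single pass carrying both candidate lists; objective: alternative (same cost, one traversal).

-- ===== PORT A =====
-- A's first loop: for line in lines with in_diff flag and break on the closing fence
def aFence : List String → Bool → List String
  | [], _ => []
  | l :: ls, in_diff =>
    if PySem.Str.isIn "```diff" l || PySem.Str.isIn "```suggestion" l then
      aFence ls true                                    -- in_diff = True; continue
    else if in_diff && (PySem.Str.strip l == "```") then
      []                                                -- break
    else if in_diff then
      l :: aFence ls in_diff                            -- diff_lines.append(line)
    else
      aFence ls in_diff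

-- A's second loop: lines whose stripped form starts with '+'/'-' and has length > 1
def aPM : List String → List String
  | [] => []
  | l :: ls =>
    if (PySem.Str.startswith (PySem.Str.strip l) "+"
        || PySem.Str.startswith (PySem.Str.strip l) "-")
       && 1 < PySem.Str.len (PySem.Str.strip l) then
      l :: aPM ls
    else
      aPM ls

def extract_proposed_diff_py (raw_content : String) : String :=
  if raw_content == "" then ""
  else
    let lines := (PySem.Str.split? raw_content "\n").getD []
    let diff_lines := aFence lines false
    if diff_lines ≠ [] then PySem.Str.join "\n" diff_lines
    else
      let diff_lines2 := aPM lines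
      if diff_lines2 ≠ [] then PySem.Str.join "\n" diff_lines2
      else ""

-- ===== PORT B =====
-- B's single pass: state (in_diff, fence_done); returns (fenced lines, +/- lines)
def bLoop : List String → Bool → Bool → (List String × List String)
  | [], _, _ => ([], [])
  | l :: ls, in_diff, fence_done =>
    let s := PySem.Str.strip l
    let st :=       -- (in_diff', fence_done', capture this line into fenced?)
      if fence_done then (in_diff, true, false)
      else if PySem.Str.isIn "```diff" l || PySem.Str.isIn "```suggestion" l then
        (true, false, false)
      else if in_diff && (s == "```") then (false, true, false)
      else if in_diff then (in_diff, false, true)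
      else (in_diff, false, false)
    let pm := (PySem.Str.startswith s "+" || PySem.Str.startswith s "-")
              && 1 < PySem.Str.len s
    let rest := bLoop ls st.1 st.2.1
    ((if st.2.2 then l :: rest.1 else rest.1), (if pm then l :: rest.2 else rest.2))

def extract_proposed_diff_py_alt (raw_content : String) : String :=
  let r := bLoop ((PySem.Str.split? raw_content "\n").getD []) false false
  if r.1 ≠ [] then PySem.Str.join "\n" r.1
  else if r.2 ≠ [] then PySem.Str.join "\n" r.2
  else ""

-- ===== PRECONDITION & SPEC =====
def Spec_extract_proposed_diff_py (raw_content : String) (out : String) : Prop := out = extract_proposed_diff_py_alt raw_content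
instance (raw_content : String) (out : String) : Decidable (Spec_extract_proposed_diff_py raw_content out) := by unfold Spec_extract_proposed_diff_py; infer_instance

-- ===== CLAIM (what is proved, stated in full; the proofs are below) =====
def Claim_equal_extract_proposed_diff_py : Prop := ∀ (raw_content : String), Dom_extract_proposed_diff_py raw_content → Spec_extract_proposed_diff_py raw_content (extract_proposed_diff_py raw_content)

-- ===== LEMMAS AND PROOFS =====

-- once fence_done is set, B never adds another fenced line
theorem bLoop_fst_done (ls : List String) (id : Bool) :
    (bLoop ls id true).1 = [] := by
  induction ls generalizing id with
  | nil => rfl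
  | cons l ls ih => simp [bLoop, ih]

-- B's fenced component equals A's first loop
theorem bLoop_fst (ls : List String) (id : Bool) :
    (bLoop ls id false).1 = aFence ls id := by
  induction ls generalizing id with
  | nil => rfl
  | cons l ls ih =>
    simp only [bLoop, aFence]
    split_ifs <;> simp_all [bLoop_fst_done]

-- B's +/- component equals A's second loop, whatever the fence state
theorem bLoop_snd (ls : List String) (id fd : Bool) :
    (bLoop ls id fd).2 = aPM ls := by
  induction ls generalizing id fd with
  | nil => rfl
  | cons l ls ih => simp only [bLoop, aPM]; split_ifs <;> simp [ih]

-- ===== VERDICT (by name: the statement is the Claim_ definition above) =====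
theorem extract_proposed_diff_py_spec : Claim_equal_extract_proposed_diff_py := by
  intro raw _
  unfold Spec_extract_proposed_diff_py extract_proposed_diff_py extract_proposed_diff_py_alt
  by_cases h : raw = ""
  · subst h; decide
  · simp only [bLoop_fst, bLoop_snd, beq_iff_eq, h, if_false]
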